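-- pv_equiv track=rewrite | github.com/AnalyzerOfThings/Room_Occupancy_Estimation | model_functions.py | get_reco
-- ===== SOURCE A (Python) =====
-- def get_reco(preds, max_days):
--     have = False
--     recos = []
--     for pred in preds:
--         if not have:
--             if pred > max_days-1:
--                 recos.append(3) # ignore
--             else:
--                 recos.append(1) # buy
--                 have = True
--         else:
--             if pred > max_days-1:
--                 recos.append(0) # sell
--                 have = False
--             else:
--                 recos.append(2) # hold
--     return recos
-- ===== SOURCE B (Python) =====
-- def get_reco(preds, max_days):
--     # Branch-free arithmetic formulation in staged passes instead of a state machine: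
--     # o[i] = 1 iff preds[i] > max_days-1; holding before i is h[i] = 1 - o[i-1] (h[0] = 0);
--     # the 4-way code table collapses to the polynomial 1 + 2*o + h - 4*o*h.
--     o = [1 if p > max_days - 1 else 0 for p in preds]
--     h = [0] + [1 - x for x in o[:-1]]
--     return [1 + 2*a + b - 4*a*b for a, b in zip(o, h)]
-- ===== Notes on version B (the rewrite author's own statement) =====
-- stated objective: alternative
-- what changed: Replaces A's imperative state machine (a 'have' flag threaded through one branching loop) with a branch-free arithmetic formulation in staged passes: an over-threshold indicator list o, a shifted holding list h = [0] + [1-x for x in o[:-1]], and the code table collapsed to the polynomial 1 + 2*o + h - 4*o*h.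
import Mathlib
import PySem

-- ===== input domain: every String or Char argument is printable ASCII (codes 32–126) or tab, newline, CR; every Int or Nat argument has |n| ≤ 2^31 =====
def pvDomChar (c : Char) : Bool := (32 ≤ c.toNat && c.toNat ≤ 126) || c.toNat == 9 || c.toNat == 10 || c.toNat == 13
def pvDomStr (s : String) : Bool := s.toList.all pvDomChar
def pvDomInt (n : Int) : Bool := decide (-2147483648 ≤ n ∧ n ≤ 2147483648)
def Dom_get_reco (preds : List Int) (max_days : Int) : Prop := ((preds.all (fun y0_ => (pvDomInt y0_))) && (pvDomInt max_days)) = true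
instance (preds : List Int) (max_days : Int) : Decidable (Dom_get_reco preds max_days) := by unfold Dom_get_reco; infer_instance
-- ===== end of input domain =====

-- B replaces A's threaded state machine by a branch-free arithmetic formulation in staged passes (alternative decomposition; same O(n) cost).

-- ===== PORT A =====
-- A: fold carrying the state (have, recos), branches in source order.
def pvStepA (max_days : Int) (st : Bool × List Int) (pred : Int) : Bool × List Int :=
  if !st.1 then
    if pred > max_days - 1 then (st.1, st.2 ++ [3])
    else (true, st.2 ++ [1])
  else
    if pred > max_days - 1 then (false, st.2 ++ [0])
    else (st.1, st.2 ++ [2])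

def get_reco (preds : List Int) (max_days : Int) : List Int :=
  (preds.foldl (pvStepA max_days) (false, [])).2

-- ===== PORT B =====
-- B: staged passes — indicator list o, shifted holding list h (o[:-1] is List.dropLast,
-- exact since Python's [:-1] drops the last element and is [] on []), then the polynomial map over zip.
def get_reco_alt (preds : List Int) (max_days : Int) : List Int :=
  let o : List Int := preds.map (fun p => if p > max_days - 1 then 1 else 0)
  let h : List Int := 0 :: (o.dropLast.map (fun x => 1 - x))
  (o.zip h).map (fun ab => 1 + 2 * ab.1 + ab.2 - 4 * ab.1 * ab.2)

-- ===== PRECONDITION & SPEC =====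
def Spec_get_reco (preds : List Int) (max_days : Int) (out : List Int) : Prop := out = get_reco_alt preds max_days
instance (preds : List Int) (max_days : Int) (out : List Int) : Decidable (Spec_get_reco preds max_days out) := by unfold Spec_get_reco; infer_instance

-- ===== CLAIM (what is proved, stated in full; the proofs are below) =====
def Claim_equal_get_reco : Prop := ∀ (preds : List Int) (max_days : Int), Dom_get_reco preds max_days → Spec_get_reco preds max_days (get_reco preds max_days)

-- ===== LEMMAS AND PROOFS =====

-- common recursive characterisation: emit the reco for the current holding state, next state is pred ≤ m-1
def recoRec (m : Int) (h : Bool) : List Int → List Int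
  | [] => []
  | p :: rest =>
    (if h then (if p > m - 1 then 0 else 2) else (if p > m - 1 then 3 else 1)) ::
      recoRec m (decide (p ≤ m - 1)) rest

theorem foldA_eq (m : Int) (preds : List Int) : ∀ (h : Bool) (acc : List Int),
    (preds.foldl (pvStepA m) (h, acc)).2 = acc ++ recoRec m h preds := by
  induction preds with
  | nil => intro h acc; simp [recoRec]
  | cons p rest ih =>
    intro h acc
    by_cases hp : p > m - 1
    · have hle : ¬ p ≤ m - 1 := by omega
      have hstep : pvStepA m (h, acc) p = (false, acc ++ [if h then 0 else 3]) := by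
        cases h <;> simp [pvStepA, hp]
      rw [List.foldl_cons, hstep, ih, recoRec]
      simp [hp, hle]
    · have hle : p ≤ m - 1 := by omega
      have hstep : pvStepA m (h, acc) p = (true, acc ++ [if h then 2 else 1]) := by
        cases h <;> simp [pvStepA, hp]
      rw [List.foldl_cons, hstep, ih, recoRec]
      simp [hp, hle]

theorem getA_eq (preds : List Int) (m : Int) : get_reco preds m = recoRec m false preds := by
  simpa using foldA_eq m preds false []

-- B's zipped staged passes compute recoRec, generalised over the current holding bit b
theorem zipB_eq (m : Int) (preds : List Int) : ∀ (b : Bool),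
    (((preds.map (fun p => if p > m - 1 then (1:Int) else 0)).zip
        ((if b then (1:Int) else 0) ::
          ((preds.map (fun p => if p > m - 1 then (1:Int) else 0)).dropLast.map (fun x => 1 - x)))).map
      (fun ab => 1 + 2 * ab.1 + ab.2 - 4 * ab.1 * ab.2))
      = recoRec m b preds := by
  induction preds with
  | nil => intro b; simp [recoRec]
  | cons p rest ih =>
    intro b
    cases rest with
    | nil =>
      cases b <;> by_cases hp : p > m - 1 <;>
        simp_all [recoRec] <;> omega
    | cons q rest' =>
      have htail := ih (decide (p ≤ m - 1))
      by_cases hp : p > m - 1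
      · have hle : ¬ p ≤ m - 1 := by omega
        simp only [List.map_cons, List.dropLast_cons₂, List.zip_cons_cons] at htail ⊢
        rw [recoRec]
        simp only [hp, hle, if_true, if_false, decide_eq_true_eq] at htail ⊢
        rw [← htail]
        congr 1
        · cases b <;> norm_num
      · have hle : p ≤ m - 1 := by omega
        simp only [List.map_cons, List.dropLast_cons₂, List.zip_cons_cons] at htail ⊢
        rw [recoRec]
        simp only [hp, hle, if_true, if_false, decide_eq_true_eq] at htail ⊢
        rw [← htail]
        congr 1
        · cases b <;> norm_num

theorem getB_eq (preds : List Int) (m : Int) : get_reco_alt preds m = recoRec m false preds := by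
  simpa [get_reco_alt] using zipB_eq m preds false

-- ===== VERDICT (by name: the statement is the Claim_ definition above) =====
theorem get_reco_spec : Claim_equal_get_reco := by
  intro preds m _
  unfold Spec_get_reco
  rw [getA_eq, getB_eq]
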